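-- pv_equiv track=rewrite | github.com/dtrik/100daysofcode | rosalind_dna.py | recurrence
-- ===== SOURCE A (Python) =====
-- mem = {}
--
-- def recurrence(n, k = 1):
--     if (n, k) in mem:
--         return mem[n, k]
--
--     if n in [1, 2]:
--         pairs = 1
--     else:
--         pairs  = recurrence(n-1, k)+ k*recurrence(n-2, k)
--     mem[n, k] = pairs
--     return pairs
-- ===== SOURCE B (Python) =====
-- def recurrence(n, k=1):
--     prev2, prev1 = 1, 1
--     for _ in range(3, n + 1):
--         prev2, prev1 = prev1, prev1 + k * prev2
--     return prev1
-- ===== Notes on version B (the rewrite author's own statement) =====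
-- stated objective: simpler
-- what changed: Replaced the memoized top-down recursion with a bottom-up loop keeping only the last two values (no memo dict, no recursion).
import Mathlib
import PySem

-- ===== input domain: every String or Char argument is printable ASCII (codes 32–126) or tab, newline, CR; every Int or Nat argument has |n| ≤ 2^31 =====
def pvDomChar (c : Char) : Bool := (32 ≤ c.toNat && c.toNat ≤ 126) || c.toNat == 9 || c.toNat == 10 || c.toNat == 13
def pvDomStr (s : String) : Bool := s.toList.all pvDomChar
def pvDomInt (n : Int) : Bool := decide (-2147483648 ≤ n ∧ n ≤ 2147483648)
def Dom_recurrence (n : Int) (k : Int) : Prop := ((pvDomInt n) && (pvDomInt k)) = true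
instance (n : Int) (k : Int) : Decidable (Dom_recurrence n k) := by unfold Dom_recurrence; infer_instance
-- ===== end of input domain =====

-- B replaces A's memoized top-down recursion by a bottom-up two-variable loop (no memo dict);
-- equal on n ≥ 1; for n ≤ 0 A raises RecursionError (infinite recursion) while B returns 1.

-- ===== PORT A =====
-- A's memo dict `mem` is threaded as state (Python mutates a global dict; it persists across
-- calls, but cached values never differ from freshly computed ones, so each call is ported
-- starting from an empty memo). For n ≤ 0 A recurses forever (RecursionError); those inputs
-- are excluded by Pre_recurrence and the port returns 0 there without inserting.
def recurrenceMemo (mem : PySem.Dict (Int × Int) Int) (n : Int) (k : Int) :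
    PySem.Dict (Int × Int) Int × Int :=
  match mem.get? (n, k) with
  | some v => (mem, v)
  | none =>
    if n = 1 ∨ n = 2 then
      (mem.insert (n, k) 1, 1)
    else if h3 : 3 ≤ n then
      let r1 := recurrenceMemo mem (n - 1) k
      let r2 := recurrenceMemo r1.1 (n - 2) k
      let pairs := r1.2 + k * r2.2
      (r2.1.insert (n, k) pairs, pairs)
    else (mem, 0)
termination_by n.toNat
decreasing_by
  · omega
  · omega

def recurrence (n : Int) (k : Int) : Int := (recurrenceMemo PySem.Dict.empty n k).2

-- ===== PORT B =====
def recurrence_alt (n : Int) (k : Int) : Int :=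
  ((PySem.List.pyRange 3 (n + 1) 1).foldl
      (fun (s : Int × Int) _ => (s.2, s.2 + k * s.1)) (1, 1)).2

-- ===== PRECONDITION & SPEC =====
-- Pre_ excludes exactly n ≤ 0, where A's recursion never terminates (RecursionError).
def Pre_recurrence (n : Int) (k : Int) : Prop := 1 ≤ n
instance (n : Int) (k : Int) : Decidable (Pre_recurrence n k) := by unfold Pre_recurrence; infer_instance
def pvWitness_recurrence : Int × Int := (7, 3)

def Spec_recurrence (n : Int) (k : Int) (out : Int) : Prop := out = recurrence_alt n k
instance (n : Int) (k : Int) (out : Int) : Decidable (Spec_recurrence n k out) := by unfold Spec_recurrence; infer_instance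

-- ===== CLAIM (what is proved, stated in full; the proofs are below) =====
def Claim_equal_recurrence : Prop := ∀ (n : Int) (k : Int), Dom_recurrence n k → Pre_recurrence n k → Spec_recurrence n k (recurrence n k)

-- ===== LEMMAS AND PROOFS =====

-- Pure reference recursion (proof-only; never evaluated): the value A's recurrence denotes.
def fibA (n : Int) (k : Int) : Int :=
  if n = 1 ∨ n = 2 then 1
  else if h3 : 3 ≤ n then fibA (n - 1) k + k * fibA (n - 2) k
  else 0
termination_by n.toNat
decreasing_by
  · omega
  · omega

-- memo invariant: every cached entry is the reference value
def MemoInv (mem : PySem.Dict (Int × Int) Int) : Prop :=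
  ∀ p v, mem.get? p = some v → v = fibA p.1 p.2

theorem memoInv_insert {mem : PySem.Dict (Int × Int) Int} (h : MemoInv mem)
    (n k v : Int) (hv : v = fibA n k) : MemoInv (mem.insert (n, k) v) := by
  intro p w hw
  rw [PySem.Dict.get?_insert] at hw
  split_ifs at hw with hp
  · cases hw; subst hp; exact hv
  · exact h p w hw

theorem memo_correct (n k : Int) (mem : PySem.Dict (Int × Int) Int) (h : MemoInv mem) :
    (recurrenceMemo mem n k).2 = fibA n k ∧ MemoInv (recurrenceMemo mem n k).1 := by
  rw [recurrenceMemo]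
  cases hg : mem.get? (n, k) with
  | some v => exact ⟨h (n, k) v hg, h⟩
  | none =>
    by_cases h12 : n = 1 ∨ n = 2
    · simp only [h12, if_true]
      have : fibA n k = 1 := by rw [fibA]; simp [h12]
      exact ⟨this.symm, memoInv_insert h n k 1 this.symm⟩
    · simp only [h12, if_false]
      by_cases h3 : 3 ≤ n
      · simp only [dif_pos h3]
        have ih1 := memo_correct (n - 1) k mem h
        have ih2 := memo_correct (n - 2) k (recurrenceMemo mem (n - 1) k).1 ih1.2
        have hval : (recurrenceMemo mem (n - 1) k).2 +
            k * (recurrenceMemo (recurrenceMemo mem (n - 1) k).1 (n - 2) k).2 = fibA n k := by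
          rw [ih1.1, ih2.1]
          conv_rhs => rw [fibA, if_neg h12, dif_pos h3]
        exact ⟨hval, memoInv_insert ih2.2 n k _ hval⟩
      · simp only [dif_neg h3]
        have : fibA n k = 0 := by rw [fibA]; simp [h12, h3]
        exact ⟨this.symm, h⟩
termination_by n.toNat
decreasing_by
  · omega
  · omega

theorem recurrence_eq_fibA (n k : Int) : recurrence n k = fibA n k := by
  have hinv : MemoInv PySem.Dict.empty := by
    intro p v hv
    rw [PySem.Dict.get?_empty] at hv
    cases hv
  exact (memo_correct n k PySem.Dict.empty hinv).1

-- B's loop invariant: after processing range(3, n+1) the pair holds (fibA (n-1), fibA n), for n ≥ 2.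
theorem loop_pair (m : Nat) (k : Int) :
    ((PySem.List.pyRange 3 ((2 : Int) + m + 1) 1).foldl
        (fun (s : Int × Int) _ => (s.2, s.2 + k * s.1)) (1, 1))
      = (fibA ((2 : Int) + m - 1) k, fibA ((2 : Int) + m) k) := by
  induction m with
  | zero =>
      rw [PySem.List.pyRange_one_eq_nil (by norm_num)]
      simp [fibA]
  | succ m ih =>
      have h1 : ((2 : Int) + ↑(m + 1) + 1) = ((2 : Int) + m + 1) + 1 := by push_cast; ring
      rw [h1, PySem.List.pyRange_one_succ_right (by omega), List.foldl_append, ih]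
      have hA : fibA ((2 : Int) + ↑(m + 1)) k
          = fibA ((2 : Int) + ↑(m + 1) - 1) k + k * fibA ((2 : Int) + ↑(m + 1) - 2) k := by
        rw [fibA, if_neg (by push_cast; omega), dif_pos (by push_cast; omega)]
      simp only [List.foldl_cons, List.foldl_nil]
      have e1 : (2 : Int) + ↑(m + 1) - 1 = 2 + ↑m := by push_cast; ring
      have e2 : (2 : Int) + ↑(m + 1) - 2 = 2 + ↑m - 1 := by push_cast; ring
      rw [hA, e1, e2]

-- ===== VERDICT (by name: the statement is the Claim_ definition above) =====
theorem recurrence_spec : Claim_equal_recurrence := by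
  intro n k _ hpre
  unfold Spec_recurrence recurrence_alt
  rw [recurrence_eq_fibA]
  by_cases h12 : n = 1 ∨ n = 2
  · rcases h12 with h | h <;> subst h <;>
      · rw [PySem.List.pyRange_one_eq_nil (by norm_num)]; simp [fibA]
  · have h3 : 3 ≤ n := by unfold Pre_recurrence at hpre; omega
    obtain ⟨m, hm⟩ : ∃ m : Nat, n = 2 + (m : Int) := ⟨(n - 2).toNat, by omega⟩
    subst hm
    rw [loop_pair m k]
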